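-- pv_equiv track=rewrite | github.com/schaferjart/meinungeheuer | apps/print-renderer/md_renderer.py | _merge_char_row
-- ===== SOURCE A (Python) =====
-- def _merge_char_row(char_row):
--     """Merge consecutive (char, style) pairs with the same style into segments."""
--     if not char_row:
--         return [("", "normal")]
--     merged = []
--     current_text = char_row[0][0]
--     current_style = char_row[0][1]
--     for ch, style in char_row[1:]:
--         if style == current_style:
--             current_text += ch
--         else:
--             merged.append((current_text, current_style))
--             current_text = ch
--             current_style = style
--     merged.append((current_text, current_style))
--     return merged
-- ===== SOURCE B (Python) =====
-- def _merge_char_row(char_row):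
--     """Merge consecutive (char, style) pairs with the same style into segments."""
--     if not char_row:
--         return [("", "normal")]
--     out = []
--     i, n = 0, len(char_row)
--     while i < n:
--         style = char_row[i][1]
--         j = i
--         while j < n and char_row[j][1] == style:
--             j += 1
--         out.append(("".join(ch for ch, _ in char_row[i:j]), style))
--         i = j
--     return out
-- ===== Notes on version B (the rewrite author's own statement) =====
-- stated objective: alternative
-- what changed: Replaces the per-character accumulate-and-flush state machine with a groupby-style span scan: an outer loop over maximal same-style runs (found with an inner two-pointer scan) whose characters are joined into one segment at once.
import Mathlib
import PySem

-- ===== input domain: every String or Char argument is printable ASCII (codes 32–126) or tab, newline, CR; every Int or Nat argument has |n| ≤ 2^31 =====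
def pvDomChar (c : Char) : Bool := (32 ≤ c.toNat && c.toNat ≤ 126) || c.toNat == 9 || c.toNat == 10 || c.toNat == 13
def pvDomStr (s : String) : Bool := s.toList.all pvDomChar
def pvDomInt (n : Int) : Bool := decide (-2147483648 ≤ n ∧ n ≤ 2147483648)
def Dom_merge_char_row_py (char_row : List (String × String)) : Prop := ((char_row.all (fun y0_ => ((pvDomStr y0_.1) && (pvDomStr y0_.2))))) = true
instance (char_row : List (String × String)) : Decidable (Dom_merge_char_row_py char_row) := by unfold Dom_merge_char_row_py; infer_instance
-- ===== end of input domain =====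

-- B replaces A's per-character accumulate-and-flush state machine with a span scan over
-- maximal same-style runs, joining each run's characters at once (alternative decomposition).


-- ===== PORT A =====
-- state = (merged, current_text, current_style); the loop over char_row[1:] is a foldl
def merge_char_row_py (char_row : List (String × String)) : List (String × String) :=
  match char_row with
  | [] => [("", "normal")]
  | p :: rest =>
    let st := rest.foldl
      (fun (st : List (String × String) × String × String) q =>
        if q.2 == st.2.2 then (st.1, st.2.1 ++ q.1, st.2.2)
        else (st.1 ++ [(st.2.1, st.2.2)], q.1, q.2))
      ([], p.1, p.2)
    st.1 ++ [(st.2.1, st.2.2)]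

-- ===== PORT B =====
-- one maximal same-style run per step: the inner while-scan is takeWhile/dropWhile on the tail
def mergeRuns (l : List (String × String)) : List (String × String) :=
  match l with
  | [] => []
  | p :: rest =>
    (PySem.Str.join "" ((p :: rest.takeWhile (fun q => q.2 == p.2)).map Prod.fst), p.2)
      :: mergeRuns (rest.dropWhile (fun q => q.2 == p.2))
termination_by l.length
decreasing_by
  have := List.length_dropWhile_le (fun q => q.2 == p.2) rest
  simp; omega

def merge_char_row_py_alt (char_row : List (String × String)) : List (String × String) :=
  match char_row with
  | [] => [("", "normal")]
  | l => mergeRuns l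

-- ===== PRECONDITION & SPEC =====
def Spec_merge_char_row_py (char_row : List (String × String)) (out : List (String × String)) : Prop := out = merge_char_row_py_alt char_row
instance (char_row : List (String × String)) (out : List (String × String)) : Decidable (Spec_merge_char_row_py char_row out) := by unfold Spec_merge_char_row_py; infer_instance

-- ===== CLAIM (what is proved, stated in full; the proofs are below) =====
def Claim_equal_merge_char_row_py : Prop := ∀ (char_row : List (String × String)), Dom_merge_char_row_py char_row → Spec_merge_char_row_py char_row (merge_char_row_py char_row)

-- ===== LEMMAS AND PROOFS =====
theorem join_empty_cons (a : String) (l : List String) :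
    PySem.Str.join "" (a :: l) = a ++ PySem.Str.join "" l := by
  simp [PySem.Str.join, PySem.Chars.join, List.intercalate]
  rw [← String.toList_inj]
  simp [String.toList_append]
  cases l with
  | nil => simp
  | cons b r => simp

-- absorbing a same-style head pair into the accumulated text commutes with mergeRuns
theorem mergeRuns_absorb (cur sty : String) (q : String × String) (rest : List (String × String))
    (h : q.2 == sty) :
    mergeRuns ((cur, sty) :: q :: rest) = mergeRuns ((cur ++ q.1, sty) :: rest) := by
  rw [mergeRuns, mergeRuns]
  simp only [List.takeWhile, List.dropWhile, h]
  simp [join_empty_cons, String.append_assoc]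

-- the loop invariant: folding the tail from state (merged, cur, sty) then flushing
-- equals merged ++ the run decomposition of (cur, sty) :: tail
theorem fold_eq_runs (rest : List (String × String)) :
    ∀ (merged : List (String × String)) (cur sty : String),
    (let st := rest.foldl
        (fun (st : List (String × String) × String × String) q =>
          if q.2 == st.2.2 then (st.1, st.2.1 ++ q.1, st.2.2)
          else (st.1 ++ [(st.2.1, st.2.2)], q.1, q.2))
        (merged, cur, sty)
     st.1 ++ [(st.2.1, st.2.2)]) = merged ++ mergeRuns ((cur, sty) :: rest) := by
  induction rest with
  | nil =>
    intro merged cur sty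
    rw [mergeRuns]
    simp [mergeRuns, PySem.Str.join, PySem.Chars.join, List.intercalate]
  | cons q rest ih =>
    obtain ⟨q1, q2⟩ := q
    intro merged cur sty
    by_cases h : (q2 == sty) = true
    · simp only [List.foldl_cons, h, reduceIte]
      rw [mergeRuns_absorb cur sty (q1, q2) rest h]
      exact ih merged (cur ++ q1) sty
    · have h' : (q2 == sty) = false := by simpa using h
      simp only [List.foldl_cons, h', Bool.false_eq_true, reduceIte]
      rw [mergeRuns]
      simp only [List.takeWhile, List.dropWhile, h']
      have hj : PySem.Str.join "" [cur] = cur := by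
        rw [join_empty_cons]
        simp [PySem.Str.join, PySem.Chars.join, List.intercalate]
      simp only [List.map, hj]
      rw [show merged ++ ((cur, sty) :: mergeRuns ((q1, q2) :: rest))
            = (merged ++ [(cur, sty)]) ++ mergeRuns ((q1, q2) :: rest) by simp]
      exact ih (merged ++ [(cur, sty)]) q1 q2

-- ===== VERDICT (by name: the statement is the Claim_ definition above) =====
theorem merge_char_row_py_spec : Claim_equal_merge_char_row_py := by
  intro char_row _
  unfold Spec_merge_char_row_py merge_char_row_py merge_char_row_py_alt
  match char_row with
  | [] => rfl
  | p :: rest =>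
    have := fold_eq_runs rest [] p.1 p.2
    simpa using this
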